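-- pv_equiv track=rewrite | github.com/NeLy-EPFL/ballpushing_utils | src/Screen_analysis/plot_grouped_screen_metrics.py | resolve_metric_name
-- ===== SOURCE A (Python) =====
-- METRIC_ALIASES = {
--     "velocity_during_interaction": "velocity_during_interactions",
-- }
--
-- def normalize_token(value):
--     return "".join(ch.lower() for ch in str(value) if ch.isalnum())
--
-- def resolve_metric_name(metric_input, available_columns):
--     metric_raw = str(metric_input).strip()
--     if not metric_raw:
--         return None
--
--     metric_candidate = METRIC_ALIASES.get(metric_raw, metric_raw)
--     if metric_candidate in available_columns:
--         return metric_candidate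
--
--     lower_matches = [col for col in available_columns if str(col).lower() == metric_candidate.lower()]
--     if len(lower_matches) == 1:
--         return lower_matches[0]
--
--     metric_norm = normalize_token(metric_candidate)
--     norm_matches = [col for col in available_columns if normalize_token(col) == metric_norm]
--     if len(norm_matches) == 1:
--         return norm_matches[0]
--
--     return None
-- ===== SOURCE B (Python) =====
-- METRIC_ALIASES = {
--     "velocity_during_interaction": "velocity_during_interactions",
-- }
--
-- def normalize_token(value):
--     return "".join(ch.lower() for ch in str(value) if ch.isalnum())
--
-- def resolve_metric_name(metric_input, available_columns):
--     metric_raw = str(metric_input).strip()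
--     if not metric_raw:
--         return None
--
--     metric_candidate = METRIC_ALIASES.get(metric_raw, metric_raw)
--     cand_lower = metric_candidate.lower()
--     metric_norm = normalize_token(metric_candidate)
--
--     # single pass: gather all three kinds of matches at once, in column order
--     exact_found = False
--     lower_matches = []
--     norm_matches = []
--     for col in available_columns:
--         if col == metric_candidate:
--             exact_found = True
--         if str(col).lower() == cand_lower:
--             lower_matches.append(col)
--         if normalize_token(col) == metric_norm:
--             norm_matches.append(col)
--
--     if exact_found:
--         return metric_candidate
--     if len(lower_matches) == 1:
--         return lower_matches[0]
--     if len(norm_matches) == 1: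
--         return norm_matches[0]
--     return None
-- ===== Notes on version B (the rewrite author's own statement) =====
-- stated objective: faster
-- what changed: Replaces A's up-to-three separate scans of available_columns (membership test plus two list-comprehension filters) with a single pass that simultaneously maintains an exact-match flag and the lower-case and normalized match lists, applying the same priority afterwards.
import Mathlib
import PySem

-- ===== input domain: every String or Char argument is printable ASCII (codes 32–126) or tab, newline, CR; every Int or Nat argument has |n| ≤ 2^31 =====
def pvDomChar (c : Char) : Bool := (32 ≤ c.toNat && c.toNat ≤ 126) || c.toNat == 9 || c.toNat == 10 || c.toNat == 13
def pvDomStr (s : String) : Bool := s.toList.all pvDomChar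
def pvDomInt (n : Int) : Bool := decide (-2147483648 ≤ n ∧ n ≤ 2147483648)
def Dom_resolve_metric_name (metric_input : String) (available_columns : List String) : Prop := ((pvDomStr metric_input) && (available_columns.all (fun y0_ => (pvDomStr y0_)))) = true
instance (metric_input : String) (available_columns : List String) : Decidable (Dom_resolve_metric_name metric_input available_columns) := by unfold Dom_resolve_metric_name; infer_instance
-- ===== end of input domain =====

-- B fuses A's up-to-three scans of available_columns (membership + two filters) into one pass
-- maintaining an exact-match flag and both match lists; same priority applied afterwards (faster by constant factor).


-- ===== PORT A =====
def METRIC_ALIASES : PySem.Dict String String :=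
  PySem.Dict.ofList [("velocity_during_interaction", "velocity_during_interactions")]

-- "".join(ch.lower() for ch in str(value) if ch.isalnum())
def normalize_token (value : String) : String :=
  String.ofList ((value.toList.filter (fun ch => PySem.Chars.isalnum ch)).map PySem.Chars.lowerChar)

def resolve_metric_name (metric_input : String) (available_columns : List String) : Option String :=
  let metric_raw := PySem.Str.strip metric_input
  if metric_raw == "" then none
  else
    let metric_candidate := METRIC_ALIASES.getD metric_raw metric_raw
    if available_columns.contains metric_candidate then some metric_candidate
    else
      let lower_matches := available_columns.filter
        (fun col => PySem.Str.lower col == PySem.Str.lower metric_candidate)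
      if lower_matches.length == 1 then lower_matches.head?
      else
        let metric_norm := normalize_token metric_candidate
        let norm_matches := available_columns.filter (fun col => normalize_token col == metric_norm)
        if norm_matches.length == 1 then norm_matches.head?
        else none

-- ===== PORT B =====
def resolve_metric_name_alt (metric_input : String) (available_columns : List String) : Option String :=
  let metric_raw := PySem.Str.strip metric_input
  if metric_raw == "" then none
  else
    let metric_candidate := METRIC_ALIASES.getD metric_raw metric_raw
    let cand_lower := PySem.Str.lower metric_candidate
    let metric_norm := normalize_token metric_candidate
    -- single pass: exact flag + both match lists in column order
    let st := available_columns.foldl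
      (fun (s : Bool × List String × List String) col =>
        ( s.1 || (col == metric_candidate),
          (if PySem.Str.lower col == cand_lower then s.2.1 ++ [col] else s.2.1),
          (if normalize_token col == metric_norm then s.2.2 ++ [col] else s.2.2) ))
      (false, [], [])
    if st.1 then some metric_candidate
    else if st.2.1.length == 1 then st.2.1.head?
    else if st.2.2.length == 1 then st.2.2.head?
    else none

-- ===== PRECONDITION & SPEC =====
def Spec_resolve_metric_name (metric_input : String) (available_columns : List String) (out : Option String) : Prop := out = resolve_metric_name_alt metric_input available_columns
instance (metric_input : String) (available_columns : List String) (out : Option String) : Decidable (Spec_resolve_metric_name metric_input available_columns out) := by unfold Spec_resolve_metric_name; infer_instance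

-- ===== CLAIM (what is proved, stated in full; the proofs are below) =====
def Claim_equal_resolve_metric_name : Prop := ∀ (metric_input : String) (available_columns : List String), Dom_resolve_metric_name metric_input available_columns → Spec_resolve_metric_name metric_input available_columns (resolve_metric_name metric_input available_columns)

-- ===== LEMMAS AND PROOFS =====
-- the fused fold computes (… || any, xs ++ filter, ys ++ filter) componentwise
theorem fold_tri (l : List String) (c : String) (pl pn : String → Bool)
    (b : Bool) (xs ys : List String) :
    l.foldl (fun (s : Bool × List String × List String) col =>
        ( s.1 || (col == c),
          (if pl col then s.2.1 ++ [col] else s.2.1),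
          (if pn col then s.2.2 ++ [col] else s.2.2) )) (b, xs, ys)
      = (b || l.any (fun col => col == c), xs ++ l.filter pl, ys ++ l.filter pn) := by
  induction l generalizing b xs ys with
  | nil => simp
  | cons h t ih =>
    simp only [List.foldl_cons, ih, List.any_cons, List.filter_cons, Prod.mk.injEq]
    refine ⟨by rw [Bool.or_assoc], ?_, ?_⟩ <;> split <;> simp

theorem contains_eq_any (l : List String) (c : String) :
    l.contains c = l.any (fun col => col == c) := by
  rw [Bool.eq_iff_iff]
  simp only [List.contains_iff_mem, List.any_eq_true, beq_iff_eq]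
  exact ⟨fun h => ⟨c, h, rfl⟩, fun ⟨x, hx, he⟩ => he ▸ hx⟩

-- ===== VERDICT (by name: the statement is the Claim_ definition above) =====
theorem resolve_metric_name_spec : Claim_equal_resolve_metric_name := by
  intro metric_input available_columns _
  unfold Spec_resolve_metric_name resolve_metric_name resolve_metric_name_alt
  simp only [fold_tri, Bool.false_or, List.nil_append, contains_eq_any]
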